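-- pv_equiv track=rewrite | github.com/haku-c/LeetCodePractice | PythonSolutions/LC3247.py | subsequenceCount
-- ===== SOURCE A (Python) =====
-- from typing import List
--
-- def subsequenceCount(arr: List[int]) -> int:
--     oddCount = 0
--     evenCount = 0
--     for i in range(len(arr)):
--         current = arr[i]
--         if current % 2 == 1:
--             evenCount, oddCount = (evenCount + oddCount) % (10**9 + 7), (
--                 evenCount + oddCount + 1
--             ) % (10**9 + 7)
--
--         else:
--             evenCount = (evenCount + evenCount + 1) % (10**9 + 7)
--             oddCount = (oddCount + oddCount) % (10**9 + 7)
--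
--     return oddCount
-- ===== SOURCE B (Python) =====
-- def subsequenceCount(arr):
--     if any(x % 2 for x in arr):
--         return pow(2, len(arr) - 1, 10**9 + 7)
--     return 0
-- ===== Notes on version B (the rewrite author's own statement) =====
-- stated objective: faster
-- what changed: Replaces the two-counter DP loop with a closed form: scan once for an odd element and return pow(2, n-1, 10**9+7) if one exists, else 0 (exactly half of the 2^n subsets have odd sum when an odd element is present).
import Mathlib
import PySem

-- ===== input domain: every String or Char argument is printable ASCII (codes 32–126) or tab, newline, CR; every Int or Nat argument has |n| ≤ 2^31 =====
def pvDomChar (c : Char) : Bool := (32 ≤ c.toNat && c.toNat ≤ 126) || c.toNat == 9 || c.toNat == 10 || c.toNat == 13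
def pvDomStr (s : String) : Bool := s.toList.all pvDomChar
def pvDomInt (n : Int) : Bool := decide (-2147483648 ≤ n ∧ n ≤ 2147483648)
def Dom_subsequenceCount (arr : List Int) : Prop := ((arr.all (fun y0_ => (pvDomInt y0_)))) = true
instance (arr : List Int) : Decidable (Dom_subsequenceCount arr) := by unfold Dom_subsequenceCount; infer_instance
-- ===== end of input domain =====

-- B replaces A's two-counter DP loop by a parity scan plus one modular power (2^(n-1) mod 10^9+7); faster by constant factor.


-- ===== PORT A =====
-- step of A's loop body on the state (evenCount, oddCount)
def subseqStep (st : Int × Int) (current : Int) : Int × Int :=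
  if PySem.Int.mod current 2 = 1 then
    ((st.1 + st.2) % 1000000007, (st.1 + st.2 + 1) % 1000000007)
  else
    ((st.1 + st.1 + 1) % 1000000007, (st.2 + st.2) % 1000000007)

def subsequenceCount (arr : List Int) : Int :=
  ((PySem.List.pyRange 0 (arr.length : Int) 1).foldl
    (fun st i => subseqStep st (PySem.List.pyGetD arr i 0)) ((0 : Int), (0 : Int))).2

-- ===== PORT B =====
def subsequenceCount_alt (arr : List Int) : Int :=
  if arr.any (fun x => PySem.Int.mod x 2 != 0) then
    PySem.Int.powMod 2 (arr.length - 1) 1000000007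
  else 0

-- ===== PRECONDITION & SPEC =====
def Spec_subsequenceCount (arr : List Int) (out : Int) : Prop := out = subsequenceCount_alt arr
instance (arr : List Int) (out : Int) : Decidable (Spec_subsequenceCount arr out) := by unfold Spec_subsequenceCount; infer_instance

-- ===== CLAIM (what is proved, stated in full; the proofs are below) =====
def Claim_equal_subsequenceCount : Prop := ∀ (arr : List Int), Dom_subsequenceCount arr → Spec_subsequenceCount arr (subsequenceCount arr)

-- ===== LEMMAS AND PROOFS =====

-- once an odd element has been seen, the state is exactly ((2^m - 1) % p, 2^m % p) and doubles per step
theorem subseq_loop_afterOdd : ∀ (t : List Int) (m : Nat),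
    t.foldl subseqStep (((2:Int)^m - 1) % 1000000007, (2:Int)^m % 1000000007)
      = (((2:Int)^(m + t.length) - 1) % 1000000007, (2:Int)^(m + t.length) % 1000000007) := by
  intro t
  induction t with
  | nil => intro m; simp
  | cons x r ih =>
    intro m
    have hstep : subseqStep (((2:Int)^m - 1) % 1000000007, (2:Int)^m % 1000000007) x
        = (((2:Int)^(m+1) - 1) % 1000000007, (2:Int)^(m+1) % 1000000007) := by
      unfold subseqStep
      have hpow : (2:Int)^(m+1) = 2 * 2^m := by ring
      rcases PySem.Int.mod_two_eq x with h | h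
      · rw [h, if_neg (by norm_num), hpow, Prod.mk.injEq]
        generalize (2:Int)^m = a
        omega
      · rw [h, if_pos rfl, hpow, Prod.mk.injEq]
        generalize (2:Int)^m = a
        omega
    rw [List.foldl_cons, hstep, ih (m+1)]
    have : m + 1 + r.length = m + (x :: r).length := by simp; omega
    rw [this]

-- before any odd element, the state is ((2^k - 1) % p, 0); the result is the closed form
theorem subseq_loop_main : ∀ (t : List Int) (k : Nat),
    (t.foldl subseqStep (((2:Int)^k - 1) % 1000000007, 0)).2
      = if t.any (fun x => PySem.Int.mod x 2 == 1) then (2:Int)^(k + t.length - 1) % 1000000007 else 0 := by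
  intro t
  induction t with
  | nil => intro k; simp
  | cons x r ih =>
    intro k
    rcases PySem.Int.mod_two_eq x with h | h
    · -- x even: even counter advances to (2^(k+1) - 1) % p, odd stays 0
      have hstep : subseqStep (((2:Int)^k - 1) % 1000000007, 0) x
          = (((2:Int)^(k+1) - 1) % 1000000007, 0) := by
        unfold subseqStep
        have hpow : (2:Int)^(k+1) = 2 * 2^k := by ring
        rw [h, if_neg (by norm_num), hpow, Prod.mk.injEq]
        generalize (2:Int)^k = a
        omega
      rw [List.foldl_cons, hstep, ih (k+1)]
      have hx : (PySem.Int.mod x 2 == 1) = false := by rw [h]; rfl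
      simp only [List.any_cons, hx, Bool.false_or]
      split
      · have he : k + 1 + r.length - 1 = k + (x :: r).length - 1 := by simp
        rw [he]
      · rfl
    · -- x odd: state becomes the afterOdd shape with m = k
      have hstep : subseqStep (((2:Int)^k - 1) % 1000000007, 0) x
          = (((2:Int)^k - 1) % 1000000007, (2:Int)^k % 1000000007) := by
        unfold subseqStep
        rw [h, if_pos rfl, Prod.mk.injEq]
        generalize (2:Int)^k = a
        omega
      rw [List.foldl_cons, hstep, subseq_loop_afterOdd r k]
      have hx : (PySem.Int.mod x 2 == 1) = true := by rw [h]; rfl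
      simp only [List.any_cons, hx, Bool.true_or, if_true]
      have he : k + r.length = k + (x :: r).length - 1 := by simp
      rw [he]

-- A's index loop is the fold of subseqStep over the elements
theorem subseqA_eq_foldl (arr : List Int) :
    subsequenceCount arr = (arr.foldl subseqStep ((0:Int), (0:Int))).2 := by
  unfold subsequenceCount
  rw [PySem.List.foldl_pyRange_pyGetD' (f := subseqStep) (xs := arr) (d := 0)
      (init := ((0:Int),(0:Int))) (a := 0) (by omega)]
  simp

-- the two parity tests agree element-wise, hence the `any`s agree
theorem any_parity_eq (arr : List Int) :
    (arr.any (fun x => PySem.Int.mod x 2 != 0)) = (arr.any (fun x => PySem.Int.mod x 2 == 1)) := by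
  induction arr with
  | nil => rfl
  | cons x r ih =>
    have h2 : PySem.Int.mod x 2 = x % 2 := PySem.Int.mod_eq_emod_of_pos (by norm_num)
    have hm : ∀ y : Int, PySem.Int.mod y 2 = y % 2 := fun y => PySem.Int.mod_eq_emod_of_pos (by norm_num)
    simp only [hm] at ih
    rcases PySem.Int.mod_two_eq x with h | h <;>
      rw [h2] at h <;> rw [List.any_cons, List.any_cons, h2, h] <;> simp [ih]

-- ===== VERDICT (by name: the statement is the Claim_ definition above) =====
theorem subsequenceCount_spec : Claim_equal_subsequenceCount := by
  intro arr _
  unfold Spec_subsequenceCount subsequenceCount_alt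
  rw [subseqA_eq_foldl, any_parity_eq]
  have h0 : ((0:Int), (0:Int)) = (((2:Int)^0 - 1) % 1000000007, 0) := by norm_num
  rw [h0, subseq_loop_main arr 0, PySem.Int.powMod_eq,
      PySem.Int.mod_eq_emod_of_pos (by norm_num)]
  simp
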